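-- pv_equiv track=rewrite | github.com/adampolak/first-fit | runs/results/gen_110/main.py | coverage_cells
-- ===== SOURCE A (Python) =====
-- def coverage_cells(intervals):
--     """
--     Return list of coverage 'cells': [(l_i, r_i, m_i)], where for any x in (l_i, r_i),
--     exactly m_i intervals cover x. Open endpoints: cells span between consecutive endpoints.
--     """
--     events = []
--     for (l, r) in intervals:
--         if l >= r:
--             continue
--         events.append((l, +1))
--         events.append((r, -1))
--     if not events:
--         return []
--     # sort with right(-1) before left(+1) to honor open intervals
--     events.sort(key=lambda e: (e[0], 0 if e[1] == -1 else 1))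
--     # unique sorted endpoints
--     xs = sorted(set(x for x, _ in events))
--     # sweep to compute coverage level just after each endpoint
--     # We compute coverage value on each open cell (xs[i], xs[i+1]).
--     idx_events = 0
--     cur = 0
--     cells = []
--     # Preprocess: for each endpoint, accumulate delta before proceeding to next coordinate
--     # For open-interval semantics we apply all -1 first then +1 at each coordinate.
--     # Our event ordering already ensures that.
--     # Compute coverage between successive xs.
--     counts_at = {}
--     i = 0
--     while i < len(xs):
--         x = xs[i]
--         while idx_events < len(events) and events[idx_events][0] == x:
--             cur += events[idx_events][1]
--             idx_events += 1
--         counts_at[x] = cur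
--         i += 1
--     for i in range(len(xs) - 1):
--         a, b = xs[i], xs[i + 1]
--         # coverage on any interior point equals counts_at at right after processing at 'a'
--         m = counts_at[a]
--         if a < b:
--             cells.append((a, b, m))
--     return cells
-- ===== SOURCE B (Python) =====
-- def coverage_cells(intervals):
--     """
--     Return list of coverage 'cells': [(l_i, r_i, m_i)], where for any x in (l_i, r_i),
--     exactly m_i intervals cover x. Open endpoints: cells span between consecutive endpoints.
--     """
--     xs = sorted({e for (l, r) in intervals if l < r for e in (l, r)})
--     return [(a, b, sum(1 for (l, r) in intervals if l < r and l <= a < r))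
--             for a, b in zip(xs, xs[1:])]
-- ===== Notes on version B (the rewrite author's own statement) =====
-- stated objective: simpler
-- what changed: Replaces the doubled event list, its tie-breaking sort, the two-pointer sweep and the counts_at dict with a direct per-cell count: sort the distinct endpoints once and, for each consecutive pair (a,b), count the valid intervals with l <= a < r.
import Mathlib
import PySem

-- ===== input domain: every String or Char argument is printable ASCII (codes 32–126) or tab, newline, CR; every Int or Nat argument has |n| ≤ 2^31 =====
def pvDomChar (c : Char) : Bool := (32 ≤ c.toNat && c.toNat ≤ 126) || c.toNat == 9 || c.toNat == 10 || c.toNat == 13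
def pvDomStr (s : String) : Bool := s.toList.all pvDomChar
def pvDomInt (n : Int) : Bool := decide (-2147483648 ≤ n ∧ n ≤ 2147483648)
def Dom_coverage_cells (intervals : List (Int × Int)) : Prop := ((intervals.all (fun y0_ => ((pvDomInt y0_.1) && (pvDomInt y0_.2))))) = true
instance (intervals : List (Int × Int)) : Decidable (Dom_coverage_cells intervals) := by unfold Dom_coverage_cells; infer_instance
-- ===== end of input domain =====

-- B replaces A's doubled event list, tie-breaking sort, two-pointer sweep and counts_at dict
-- with a direct per-cell count over the sorted distinct endpoints (simpler, same results).

-- ===== PORT A =====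
-- inner 'while idx_events < len(events) and events[idx_events][0] == x: cur += ...; idx_events += 1'
-- (the index pointer is modelled by the remaining suffix of the event list)
def pvConsume (x : Int) : List (Int × Int) → Int → Int × List (Int × Int)
  | [], cur => (cur, [])
  | e :: rest, cur => if e.1 = x then pvConsume x rest (cur + e.2) else (cur, e :: rest)

-- outer 'while i < len(xs): ... counts_at[x] = cur; i += 1'
def pvSweep : List Int → List (Int × Int) → Int → PySem.Dict Int Int → PySem.Dict Int Int
  | [], _, _, d => d
  | x :: xs, evs, cur, d =>
    let p := pvConsume x evs cur
    pvSweep xs p.2 p.1 (d.insert x p.1)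

def coverage_cells (intervals : List (Int × Int)) : List (Int × Int × Int) :=
  let events := intervals.foldl
    (fun ev p => if p.1 ≥ p.2 then ev else ev ++ [(p.1, (1 : Int)), (p.2, (-1 : Int))]) []
  if events = [] then []
  else
    let sevents := PySem.List.sorted2 events (fun e => e.1) (fun e => if e.2 = -1 then (0 : Int) else 1)
    let xs := PySem.List.sorted (PySem.Set.ofList (sevents.map (fun e => e.1))) (fun x => x)
    let counts_at := pvSweep xs sevents 0 PySem.Dict.empty
    -- counts_at[a]: the key is always present, so the KeyError branch is unreachable (getD is exact here)
    (PySem.List.pyRange 0 ((xs.length : Int) - 1) 1).foldl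
      (fun cells i =>
        let a := PySem.List.pyGetD xs i 0
        let b := PySem.List.pyGetD xs (i + 1) 0
        let m := counts_at.getD a 0
        if a < b then cells ++ [(a, b, m)] else cells) []

-- ===== PORT B =====
def coverage_cells_alt (intervals : List (Int × Int)) : List (Int × Int × Int) :=
  let xs := PySem.List.sorted (PySem.Set.ofList (intervals.foldl
      (fun acc p => if p.1 < p.2 then acc ++ [p.1, p.2] else acc) [])) (fun x => x)
  (xs.zip (PySem.List.slice xs (some 1) none)).map
    (fun ab => (ab.1, ab.2,
      ((intervals.countP (fun p => decide (p.1 < p.2 ∧ p.1 ≤ ab.1 ∧ ab.1 < p.2)) : Nat) : Int)))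

-- ===== PRECONDITION & SPEC =====
def Spec_coverage_cells (intervals : List (Int × Int)) (out : List (Int × Int × Int)) : Prop := out = coverage_cells_alt intervals
instance (intervals : List (Int × Int)) (out : List (Int × Int × Int)) : Decidable (Spec_coverage_cells intervals out) := by unfold Spec_coverage_cells; infer_instance

-- ===== CLAIM (what is proved, stated in full; the proofs are below) =====
def Claim_equal_coverage_cells : Prop := ∀ (intervals : List (Int × Int)), Dom_coverage_cells intervals → Spec_coverage_cells intervals (coverage_cells intervals)

-- ===== LEMMAS AND PROOFS =====

-- the event list / flattened endpoint list of the two ports, in flatMap form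
def pvEvents (l : List (Int × Int)) : List (Int × Int) :=
  l.flatMap (fun p => if p.1 ≥ p.2 then [] else [(p.1, (1 : Int)), (p.2, (-1 : Int))])

def pvFlat (l : List (Int × Int)) : List Int :=
  l.flatMap (fun p => if p.1 < p.2 then [p.1, p.2] else [])

lemma pv_ev_foldl (l : List (Int × Int)) :
    l.foldl (fun ev p => if p.1 ≥ p.2 then ev else ev ++ [(p.1, (1 : Int)), (p.2, (-1 : Int))]) []
      = pvEvents l := by
  have h : (fun (ev : List (Int × Int)) (p : Int × Int) =>
      if p.1 ≥ p.2 then ev else ev ++ [(p.1, (1 : Int)), (p.2, (-1 : Int))])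
      = fun ev p => ev ++ (if p.1 ≥ p.2 then [] else [(p.1, (1 : Int)), (p.2, (-1 : Int))]) := by
    funext ev p; split <;> simp
  rw [h, PySem.List.foldl_append_eq_flatMap]
  rfl

lemma pv_flat_foldl (l : List (Int × Int)) :
    l.foldl (fun acc p => if p.1 < p.2 then acc ++ [p.1, p.2] else acc) [] = pvFlat l := by
  have h : (fun (acc : List Int) (p : Int × Int) =>
      if p.1 < p.2 then acc ++ [p.1, p.2] else acc)
      = fun acc p => acc ++ (if p.1 < p.2 then [p.1, p.2] else []) := by
    funext acc p; split <;> simp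
  rw [h, PySem.List.foldl_append_eq_flatMap]
  rfl

lemma pv_map_fst_events (l : List (Int × Int)) : (pvEvents l).map Prod.fst = pvFlat l := by
  induction l with
  | nil => rfl
  | cons p l ih =>
    simp only [pvEvents, pvFlat, List.flatMap_cons, List.map_append] at *
    rw [ih]
    congr 1
    rcases lt_or_ge p.1 p.2 with h | h
    · rw [if_neg (by omega), if_pos h]; rfl
    · rw [if_pos h, if_neg (by omega)]; rfl

lemma pv_sum_events (l : List (Int × Int)) (a : Int) :
    (((pvEvents l).filter (fun e => decide (e.1 ≤ a))).map Prod.snd).sum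
      = ((l.countP (fun p => decide (p.1 < p.2 ∧ p.1 ≤ a ∧ a < p.2)) : Nat) : Int) := by
  induction l with
  | nil => rfl
  | cons p l ih =>
    simp only [pvEvents, List.flatMap_cons, List.filter_append, List.map_append, List.sum_append,
      List.countP_cons] at *
    rw [ih]
    rcases lt_or_ge p.1 p.2 with h | h
    · rw [if_neg (by omega)]
      by_cases h1 : p.1 ≤ a <;> by_cases h2 : p.2 ≤ a <;>
        simp [List.filter, h1, h2, decide_eq_true_eq] <;> omega
    · rw [if_pos h]
      have : ¬ (p.1 < p.2 ∧ p.1 ≤ a ∧ a < p.2) := by omega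
      simp [this]

lemma pv_insertBy_pw (bef : (Int × Int) → (Int × Int) → Bool)
    (hb : ∀ a b, (bef a b = true → a.1 ≤ b.1) ∧ (bef a b = false → b.1 ≤ a.1))
    (x : Int × Int) (ys : List (Int × Int)) (hys : ys.Pairwise (fun a b => a.1 ≤ b.1)) :
    (PySem.List.insertBy bef x ys).Pairwise (fun a b => a.1 ≤ b.1) := by
  induction ys with
  | nil => simp [PySem.List.insertBy]
  | cons y ys ih =>
    rw [List.pairwise_cons] at hys
    show (if bef x y = true then x :: y :: ys else y :: PySem.List.insertBy bef x ys).Pairwise _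
    by_cases h : bef x y = true
    · rw [if_pos h]
      have hxy : x.1 ≤ y.1 := (hb x y).1 h
      refine List.Pairwise.cons ?_ (List.Pairwise.cons hys.1 hys.2)
      intro z hz
      rcases hz with _ | hz
      · exact hxy
      · exact le_trans hxy (hys.1 z (by assumption))
    · rw [if_neg h]
      refine List.Pairwise.cons ?_ (ih hys.2)
      intro z hz
      rw [PySem.List.mem_insertBy] at hz
      rcases hz with heq | hz
      · exact heq ▸ (hb x y).2 (by simpa using h)
      · exact hys.1 z hz

lemma pv_sorted2_pairwise_fst (xs : List (Int × Int)) (k2 : (Int × Int) → Int) :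
    (PySem.List.sorted2 xs (fun e => e.1) k2 false).Pairwise (fun a b => a.1 ≤ b.1) := by
  unfold PySem.List.sorted2
  simp only [if_neg (by decide : ¬ (false = true))]
  set bef := fun (a b : Int × Int) => decide (a.1 < b.1) || !decide (b.1 < a.1) && decide (k2 a < k2 b) with hbef
  have hb : ∀ a b, (bef a b = true → a.1 ≤ b.1) ∧ (bef a b = false → b.1 ≤ a.1) := by
    intro a b
    constructor <;> intro h <;> simp [hbef] at h <;> omega
  have main : ∀ (l : List (Int × Int)) (acc : List (Int × Int)),
      acc.Pairwise (fun a b => a.1 ≤ b.1) →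
      (l.foldl (fun acc x => PySem.List.insertBy bef x acc) acc).Pairwise (fun a b => a.1 ≤ b.1) := by
    intro l
    induction l with
    | nil => intro acc h; simpa using h
    | cons x l ih =>
      intro acc h
      exact ih _ (pv_insertBy_pw bef hb x acc h)
  exact main xs [] (by simp)

lemma pv_consume_spec (evs : List (Int × Int)) (x : Int) :
    ∀ cur, ((evs.map Prod.fst).Pairwise (· ≤ ·)) → (∀ e ∈ evs, x ≤ e.1) →
    pvConsume x evs cur
      = (cur + ((evs.filter (fun e => decide (e.1 = x))).map Prod.snd).sum,
         evs.filter (fun e => !decide (e.1 = x))) := by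
  induction evs with
  | nil => intro cur _ _; simp [pvConsume]
  | cons e rest ih =>
    intro cur hpw hge
    simp only [List.map_cons, List.pairwise_cons] at hpw
    by_cases h : e.1 = x
    · rw [show pvConsume x (e :: rest) cur = pvConsume x rest (cur + e.2) by
        simp [pvConsume, h]]
      rw [ih (cur + e.2) hpw.2 (fun f hf => hge f (List.mem_cons_of_mem _ hf))]
      simp [h]
      ring
    · rw [show pvConsume x (e :: rest) cur = (cur, e :: rest) by simp [pvConsume, h]]
      have hlt : x < e.1 := lt_of_le_of_ne (hge e (List.mem_cons_self)) (fun hh => h hh.symm)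
      have hnone : ∀ f ∈ rest, ¬ f.1 = x := by
        intro f hf
        have := hpw.1 f.1 (List.mem_map_of_mem hf)
        omega
      have h1 : List.filter (fun e => decide (e.1 = x)) (e :: rest) = [] := by
        rw [List.filter_eq_nil_iff]
        intro f hf
        rcases hf with _ | hf
        · simp [h]
        · simp [hnone f (by assumption)]
      have h2 : List.filter (fun e => !decide (e.1 = x)) (e :: rest) = e :: rest := by
        rw [List.filter_eq_self]
        intro f hf
        rcases hf with _ | hf
        · simp [h]
        · simp [hnone f (by assumption)]
      rw [h1, h2]
      simp

lemma pv_sweep_not_mem (xs : List Int) :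
    ∀ (evs : List (Int × Int)) (cur : Int) (d : PySem.Dict Int Int) (y : Int), y ∉ xs →
    (pvSweep xs evs cur d).getD y 0 = d.getD y 0 := by
  induction xs with
  | nil => intro evs cur d y _; rfl
  | cons x xs ih =>
    intro evs cur d y hy
    rw [show pvSweep (x :: xs) evs cur d
        = pvSweep xs (pvConsume x evs cur).2 (pvConsume x evs cur).1
            (d.insert x (pvConsume x evs cur).1) from rfl]
    rw [ih _ _ _ _ (fun hh => hy (List.mem_cons_of_mem _ hh))]
    exact PySem.Dict.getD_insert_of_ne _ _ _ (fun hh => hy (hh ▸ List.mem_cons_self))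
lemma pv_sum_split (evs : List (Int × Int)) (x y : Int) (hxy : x ≤ y) :
    ((evs.filter (fun e => decide (e.1 ≤ y))).map Prod.snd).sum
      = ((evs.filter (fun e => decide (e.1 = x))).map Prod.snd).sum
        + ((evs.filter (fun e => decide (e.1 ≤ y) && !decide (e.1 = x))).map Prod.snd).sum := by
  induction evs with
  | nil => simp
  | cons e evs ih =>
    by_cases h1 : e.1 = x <;> by_cases h2 : e.1 ≤ y <;>
      simp [h1, h2, hxy, ih] <;> ring

lemma pv_sweep_spec (xs : List Int) :
    ∀ (evs : List (Int × Int)) (cur : Int) (d : PySem.Dict Int Int),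
    xs.Pairwise (· < ·) → ((evs.map Prod.fst).Pairwise (· ≤ ·)) → (∀ e ∈ evs, e.1 ∈ xs) →
    ∀ y ∈ xs, (pvSweep xs evs cur d).getD y 0
      = cur + ((evs.filter (fun e => decide (e.1 ≤ y))).map Prod.snd).sum := by
  induction xs with
  | nil => intro evs cur d _ _ _ y hy; exact absurd hy (List.not_mem_nil)
  | cons x xs ih =>
    intro evs cur d hpw hevpw hmem y hy
    rw [List.pairwise_cons] at hpw
    have hge : ∀ e ∈ evs, x ≤ e.1 := by
      intro e he
      rcases List.mem_cons.mp (hmem e he) with h | h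
      · omega
      · exact le_of_lt (hpw.1 _ h)
    rw [show pvSweep (x :: xs) evs cur d
        = pvSweep xs (pvConsume x evs cur).2 (pvConsume x evs cur).1
            (d.insert x (pvConsume x evs cur).1) from rfl]
    rw [pv_consume_spec evs x cur hevpw hge]
    dsimp only
    set rest := evs.filter (fun e => !decide (e.1 = x)) with hrest
    set cur' := cur + ((evs.filter (fun e => decide (e.1 = x))).map Prod.snd).sum with hcur'
    have hrestpw : (rest.map Prod.fst).Pairwise (· ≤ ·) :=
      List.Pairwise.sublist (List.filter_sublist.map Prod.fst) hevpw
    have hrestmem : ∀ e ∈ rest, e.1 ∈ xs := by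
      intro e he
      rw [hrest, List.mem_filter] at he
      rcases List.mem_cons.mp (hmem e he.1) with h | h
      · exact absurd h (by simpa using he.2)
      · exact h
    rcases List.mem_cons.mp hy with rfl | hy'
    · have hnx : y ∉ xs := fun hh => lt_irrefl y (hpw.1 y hh)
      rw [pv_sweep_not_mem xs _ _ _ y hnx, PySem.Dict.getD_insert_self]
      have hfe : List.filter (fun e => decide ((e : Int × Int).1 ≤ y)) evs
          = List.filter (fun e => decide ((e : Int × Int).1 = y)) evs := by
        apply List.filter_congr
        intro e he
        have := hge e he
        simp only [decide_eq_decide]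
        omega
      rw [hcur', hfe]
    · rw [ih rest cur' (d.insert x cur') hpw.2 hrestpw hrestmem y hy']
      have hxy : x < y := hpw.1 y hy'
      rw [pv_sum_split evs x y (le_of_lt hxy), hcur']
      rw [hrest, List.filter_filter]
      have : (fun e => decide ((e : Int × Int).1 ≤ y) && !decide (e.1 = x))
           = (fun e => !decide ((e : Int × Int).1 = x) && decide (e.1 ≤ y)) := by
        funext e; rw [Bool.and_comm]
      rw [this]
      ring

theorem pv_main (l : List (Int × Int)) : coverage_cells l = coverage_cells_alt l := by
  simp only [coverage_cells, coverage_cells_alt, pv_ev_foldl, pv_flat_foldl]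
  by_cases hE : pvEvents l = []
  · have hF : pvFlat l = [] := by rw [← pv_map_fst_events, hE]; rfl
    simp [hE, hF]
    exact Or.inl rfl
  · rw [if_neg hE]
    have hfsteq : (fun (e : Int × Int) => e.1) = Prod.fst := rfl
    set S := PySem.List.sorted2 (pvEvents l) (fun e => e.1)
      (fun e => if e.2 = -1 then (0 : Int) else 1) with hS
    have hperm : S.Perm (pvEvents l) := PySem.List.sorted2_perm _ _ _ _
    set xsA := PySem.List.sorted (PySem.Set.ofList (S.map (fun e => e.1))) (fun x => x) with hxsA
    set xsB := PySem.List.sorted (PySem.Set.ofList (pvFlat l)) (fun x => x) with hxsB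
    have hxs : xsB = xsA := by
      rw [hxsA, hxsB]
      apply PySem.List.sorted_eq_sorted_of_perm _ _ _ (fun a b h => h)
      rw [List.perm_ext_iff_of_nodup (PySem.Set.nodup_ofList _) (PySem.Set.nodup_ofList _)]
      intro a
      rw [PySem.Set.mem_ofList, PySem.Set.mem_ofList, ← pv_map_fst_events, hfsteq]
      exact ((hperm.map Prod.fst).mem_iff).symm
    rw [hxs]
    have hxslt : xsA.Pairwise (· < ·) := hxsA ▸ PySem.List.sorted_ofList_pairwise_lt _
    have hSpw : (S.map Prod.fst).Pairwise (· ≤ ·) := by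
      rw [List.pairwise_map]
      exact pv_sorted2_pairwise_fst _ _
    have hSmem : ∀ e ∈ S, e.1 ∈ xsA := by
      intro e he
      rw [hxsA, PySem.List.mem_sorted, PySem.Set.mem_ofList]
      exact List.mem_map_of_mem he
    have hcnt : ∀ a ∈ xsA, (pvSweep xsA S 0 PySem.Dict.empty).getD a 0
        = ((l.countP (fun p => decide (p.1 < p.2 ∧ p.1 ≤ a ∧ a < p.2)) : Nat) : Int) := by
      intro a ha
      rw [pv_sweep_spec xsA S 0 _ hxslt hSpw hSmem a ha, zero_add,
        ((hperm.filter _).map Prod.snd).sum_eq, pv_sum_events]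
    -- turn the A-side fold into a map over the index range
    have hbody : (fun (cells : List (Int × Int × Int)) (i : Int) =>
          if PySem.List.pyGetD xsA i 0 < PySem.List.pyGetD xsA (i + 1) 0 then
            cells ++ [(PySem.List.pyGetD xsA i 0, PySem.List.pyGetD xsA (i + 1) 0,
              (pvSweep xsA S 0 PySem.Dict.empty).getD (PySem.List.pyGetD xsA i 0) 0)]
          else cells)
        = (fun cells i =>
          if (fun i => decide (PySem.List.pyGetD xsA i 0 < PySem.List.pyGetD xsA (i + 1) 0)) i = true then
            cells ++ [(fun i => (PySem.List.pyGetD xsA i 0, PySem.List.pyGetD xsA (i + 1) 0,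
              (pvSweep xsA S 0 PySem.Dict.empty).getD (PySem.List.pyGetD xsA i 0) 0)) i]
          else cells) := by
      funext cells i
      simp
    rw [hbody, PySem.List.foldl_append_if, List.nil_append]
    have hmemrange : ∀ i ∈ PySem.List.pyRange 0 ((xsA.length : Int) - 1) 1,
        0 ≤ i ∧ i + 1 < (xsA.length : Int) := by
      intro i hi
      rw [PySem.List.mem_pyRange_one] at hi
      omega
    have hfil : (PySem.List.pyRange 0 ((xsA.length : Int) - 1) 1).filter
          (fun i => decide (PySem.List.pyGetD xsA i 0 < PySem.List.pyGetD xsA (i + 1) 0))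
        = PySem.List.pyRange 0 ((xsA.length : Int) - 1) 1 := by
      rw [List.filter_eq_self]
      intro i hi
      rcases hmemrange i hi with ⟨h0, h1⟩
      simp only [decide_eq_true_eq]
      rw [PySem.List.pyGetD_eq_getElem xsA 0 h0 (by omega),
        PySem.List.pyGetD_eq_getElem xsA 0 (by omega) (by omega)]
      exact List.pairwise_iff_getElem.mp hxslt _ _ _ _ (by omega)
    rw [hfil]
    -- elementwise comparison
    rw [PySem.List.slice_from xsA (by norm_num)]
    apply List.ext_getElem
    · simp only [List.length_map, PySem.List.length_pyRange_one, List.length_zip,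
        List.length_drop]
      omega
    · intro i hi1 hi2
      simp only [List.getElem_map, PySem.List.getElem_pyRange_one, List.getElem_zip,
        List.getElem_drop]
      have hlen : i + 1 < xsA.length := by
        simp at hi2
        omega
      have h0i : (0 : Int) + (i : Int) = (i : Int) := by omega
      rw [h0i]
      rw [PySem.List.pyGetD_eq_getElem xsA 0 (by omega) (by omega),
        PySem.List.pyGetD_eq_getElem xsA 0 (by omega) (by omega)]
      have htn : ((i : Int)).toNat = i := by omega
      have htn1 : ((i : Int) + 1).toNat = i + 1 := by omega
      have hadd : Int.toNat 1 + i = i + 1 := by omega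
      simp only [htn, htn1, hadd]
      rw [hcnt (xsA[i]) (List.getElem_mem _)]

-- ===== VERDICT (by name: the statement is the Claim_ definition above) =====
theorem coverage_cells_spec : Claim_equal_coverage_cells := by
  intro intervals _
  exact pv_main intervals
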